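-- pv_equiv track=rewrite | github.com/Desearch-ai/subnet-22 | neurons/validators/utils/prompts.py | check_score_exists
-- ===== SOURCE A (Python) =====
-- def check_score_exists(response: str) -> bool:
--     scores = [
--         "SM_SCS_RDD",
--         "SM_SCS_PNK",
--         "SM_SCS_BLE",
--         "SM_SCS_GRY",
--         "SM_SCS_YAL",
--         "SM_SCS_GRN",
--     ]
--
--     for score in scores:
--         if score in response:
--             return True
--
--     return False
-- ===== SOURCE B (Python) =====
-- def check_score_exists(response: str) -> bool:
--     suffixes = ("RDD", "PNK", "BLE", "GRY", "YAL", "GRN")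
--     s = response
--     while s:
--         if s.startswith("SM_SCS_") and s[7:10] in suffixes:
--             return True
--         s = s[1:]
--     return False
-- ===== Notes on version B (the rewrite author's own statement) =====
-- stated objective: alternative
-- what changed: Instead of six separate substring scans (one per full tag), B makes a single left-to-right scan over the response, matching the shared 7-character tag prefix once per position and then looking the 3-character suffix up in a tuple.
import Mathlib
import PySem

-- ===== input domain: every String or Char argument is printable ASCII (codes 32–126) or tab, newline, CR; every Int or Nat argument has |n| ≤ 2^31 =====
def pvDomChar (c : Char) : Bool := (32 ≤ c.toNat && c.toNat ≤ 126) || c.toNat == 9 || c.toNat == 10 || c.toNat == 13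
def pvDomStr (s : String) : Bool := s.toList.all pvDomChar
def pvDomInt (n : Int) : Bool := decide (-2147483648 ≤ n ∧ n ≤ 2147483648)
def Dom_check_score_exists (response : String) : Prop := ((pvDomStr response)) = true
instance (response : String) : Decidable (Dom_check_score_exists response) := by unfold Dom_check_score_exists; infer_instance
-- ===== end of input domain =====

-- B replaces A's six sequential substring scans by one left-to-right scan that matches
-- the shared prefix "SM_SCS_" once per position and looks the 3-char suffix up (alternative, not faster).

-- ===== PORT A =====
def pvScores : List String :=
  ["SM_SCS_RDD", "SM_SCS_PNK", "SM_SCS_BLE", "SM_SCS_GRY", "SM_SCS_YAL", "SM_SCS_GRN"]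

def pvGoA (scores : List String) (response : String) : Bool :=
  match scores with
  | [] => false
  | s :: rest => if PySem.Str.isIn s response then true else pvGoA rest response

def check_score_exists (response : String) : Bool :=
  pvGoA pvScores response

-- ===== PORT B =====
def pvPre : List Char := "SM_SCS_".toList

def pvSuffixes : List (List Char) :=
  ["RDD".toList, "PNK".toList, "BLE".toList, "GRY".toList, "YAL".toList, "GRN".toList]

def pvGoB (l : List Char) : Bool :=
  match l with
  | [] => false
  | _ :: rest =>
      if PySem.Chars.startswith l pvPre
          && pvSuffixes.contains (PySem.List.slice l (some 7) (some 10)) then true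
      else pvGoB rest

def check_score_exists_alt (response : String) : Bool :=
  pvGoB response.toList

-- ===== PRECONDITION & SPEC =====
def Spec_check_score_exists (response : String) (out : Bool) : Prop := out = check_score_exists_alt response
instance (response : String) (out : Bool) : Decidable (Spec_check_score_exists response out) := by unfold Spec_check_score_exists; infer_instance

-- ===== CLAIM (what is proved, stated in full; the proofs are below) =====
def Claim_equal_check_score_exists : Prop := ∀ (response : String), Dom_check_score_exists response → Spec_check_score_exists response (check_score_exists response)

-- ===== LEMMAS AND PROOFS =====

theorem pvGoA_iff (scores : List String) (r : String) :
    pvGoA scores r = true ↔ ∃ s ∈ scores, PySem.Str.isIn s r = true := by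
  induction scores with
  | nil => simp [pvGoA]
  | cons s rest ih =>
    simp only [pvGoA]
    by_cases h : PySem.Str.isIn s r = true
    · rw [if_pos h]
      exact ⟨fun _ => ⟨s, by simp, h⟩, fun _ => rfl⟩
    · rw [if_neg h, ih]
      constructor
      · rintro ⟨x, hx, hin⟩
        exact ⟨x, List.mem_cons_of_mem _ hx, hin⟩
      · rintro ⟨x, hx, hin⟩
        rcases List.mem_cons.mp hx with rfl | hx
        · exact absurd hin h
        · exact ⟨x, hx, hin⟩

theorem pvGoB_iff (l : List Char) :
    pvGoB l = true ↔ ∃ t, t <:+ l ∧ (PySem.Chars.startswith t pvPre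
      && pvSuffixes.contains (PySem.List.slice t (some 7) (some 10))) = true := by
  induction l with
  | nil =>
    simp only [pvGoB]
    constructor
    · intro h; cases h
    · rintro ⟨t, ht, hp⟩
      rw [List.suffix_nil.mp ht] at hp
      exact absurd hp (by decide)
  | cons c rest ih =>
    simp only [pvGoB]
    by_cases h : (PySem.Chars.startswith (c :: rest) pvPre
        && pvSuffixes.contains (PySem.List.slice (c :: rest) (some 7) (some 10))) = true
    · rw [if_pos h]
      exact ⟨fun _ => ⟨c :: rest, List.suffix_refl _, h⟩, fun _ => rfl⟩
    · rw [if_neg h, ih]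
      constructor
      · rintro ⟨t, ht, hp⟩
        exact ⟨t, ht.trans (List.suffix_cons c rest), hp⟩
      · rintro ⟨t, ht, hp⟩
        rcases List.suffix_cons_iff.mp ht with rfl | ht
        · exact absurd hp h
        · exact ⟨t, ht, hp⟩

theorem pvSuffixes_len {suf : List Char} (h : suf ∈ pvSuffixes) : suf.length = 3 := by
  fin_cases h <;> decide

theorem pvScores_map : pvScores.map String.toList = pvSuffixes.map (fun suf => pvPre ++ suf) := by
  decide

theorem pvSlice_drop (x : List Char) :
    PySem.List.slice x (some 7) (some 10) = (x.drop 7).take 3 := by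
  rw [PySem.List.slice_toNat _ (by norm_num) (by norm_num)]
  rfl

theorem pvP_iff (t : List Char) :
    (PySem.Chars.startswith t pvPre
      && pvSuffixes.contains (PySem.List.slice t (some 7) (some 10))) = true
    ↔ ∃ suf ∈ pvSuffixes, pvPre ++ suf <+: t := by
  rw [Bool.and_eq_true, PySem.Chars.startswith_iff, List.contains_iff_mem]
  have hpre : pvPre.length = 7 := by decide
  constructor
  · rintro ⟨⟨u, rfl⟩, hmem⟩
    rw [pvSlice_drop, ← hpre, List.drop_left] at hmem
    refine ⟨u.take 3, hmem, u.drop 3, ?_⟩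
    rw [List.append_assoc, List.take_append_drop]
  · rintro ⟨suf, hmem, v, rfl⟩
    have hlen : suf.length = 3 := pvSuffixes_len hmem
    rw [List.append_assoc]
    refine ⟨⟨suf ++ v, rfl⟩, ?_⟩
    rw [pvSlice_drop, ← hpre, List.drop_left, ← hlen, List.take_left]
    exact hmem

theorem pv_main (r : String) : check_score_exists r = check_score_exists_alt r := by
  unfold check_score_exists check_score_exists_alt
  rw [Bool.eq_iff_iff, pvGoA_iff, pvGoB_iff]
  constructor
  · rintro ⟨s, hs, hin⟩
    rw [PySem.Str.isIn_iff_infix, List.infix_iff_prefix_suffix] at hin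
    rcases hin with ⟨t, hpfx, hsfx⟩
    refine ⟨t, hsfx, (pvP_iff t).mpr ?_⟩
    have : s.toList ∈ pvScores.map String.toList := List.mem_map_of_mem hs
    rw [pvScores_map, List.mem_map] at this
    rcases this with ⟨suf, hsuf, heq⟩
    exact ⟨suf, hsuf, heq ▸ hpfx⟩
  · rintro ⟨t, hsfx, hp⟩
    rcases (pvP_iff t).mp hp with ⟨suf, hsuf, hpfx⟩
    have : pvPre ++ suf ∈ pvScores.map String.toList := by
      rw [pvScores_map]; exact List.mem_map_of_mem hsuf
    rw [List.mem_map] at this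
    rcases this with ⟨s, hs, heq⟩
    refine ⟨s, hs, ?_⟩
    rw [PySem.Str.isIn_iff_infix, List.infix_iff_prefix_suffix]
    exact ⟨t, heq ▸ hpfx, hsfx⟩

-- ===== VERDICT (by name: the statement is the Claim_ definition above) =====
theorem check_score_exists_spec : Claim_equal_check_score_exists := by
  intro r _
  exact pv_main r
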